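-- pv_equiv track=rewrite | github.com/sathvikr/ai-stuff | tetris/tetris_red.py | get_col_heights
-- ===== SOURCE A (Python) =====
-- def get_col_heights(board):
--     col_heights = [0] * 10
--
--     for count in range(20):
--         row = board[count * 10: (count + 1) * 10]
--
--         for i, cell in enumerate(row):
--             if cell == "#" and col_heights[i] == 0:
--                 col_heights[i] = 20 - count
--
--     return col_heights
-- ===== SOURCE B (Python) =====
-- def get_col_heights(board):
--     # column-major: for each column, search top-down for the first filled cell
--     n = len(board)
--     return [
--         next((20 - r for r in range(20) if i + 10 * r < n and board[i + 10 * r] == "#"), 0)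
--         for i in range(10)
--     ]
-- ===== Notes on version B (the rewrite author's own statement) =====
-- stated objective: alternative
-- what changed: B is column-major: instead of a row-by-row double loop mutating a heights array under a still-zero guard, it builds the result directly as a list comprehension that, per column, searches top-down for the first filled cell with next(generator, 0).
import Mathlib
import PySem

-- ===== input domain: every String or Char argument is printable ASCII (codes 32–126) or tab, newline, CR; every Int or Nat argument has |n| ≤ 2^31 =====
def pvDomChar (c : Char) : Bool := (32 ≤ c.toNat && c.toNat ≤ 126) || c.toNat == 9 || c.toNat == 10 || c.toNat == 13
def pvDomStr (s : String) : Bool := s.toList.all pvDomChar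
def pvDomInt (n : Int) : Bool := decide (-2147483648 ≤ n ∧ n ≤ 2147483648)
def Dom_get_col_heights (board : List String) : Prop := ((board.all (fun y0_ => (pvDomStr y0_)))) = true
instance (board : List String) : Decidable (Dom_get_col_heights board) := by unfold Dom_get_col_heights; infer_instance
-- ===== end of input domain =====

-- B is column-major: a list comprehension that, per column, searches top-down for the
-- first filled cell (next(generator, 0)), replacing A's row-major mutating double loop;
-- objective: alternative decomposition, same cost.

-- ===== PORT A =====
def get_col_heights (board : List String) : List Int :=
  (PySem.List.pyRange 0 20 1).foldl
    (fun col_heights count =>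
      let row := PySem.List.slice board (some (count * 10)) (some ((count + 1) * 10))
      (PySem.List.enumerate row).foldl
        (fun ch p =>
          if p.2 == "#" && PySem.List.pyGetD ch p.1 0 == 0 then
            PySem.List.pySetD ch p.1 (20 - count)
          else ch)
        col_heights)
    (List.replicate 10 0)

-- ===== PORT B =====
-- transliteration of Source B: the generator-with-default 'next((20 - r for r in range(20)
-- if …), 0)' is List.find? over the range followed by the match; 'board[i + 10*r]' is
-- guarded by 'i + 10*r < n', so the pyGetD default "" is never the value compared.
def get_col_heights_alt (board : List String) : List Int :=
  let n : Int := board.length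
  (PySem.List.pyRange 0 10 1).map (fun i =>
    match (PySem.List.pyRange 0 20 1).find?
        (fun r => decide (i + 10 * r < n) && (PySem.List.pyGetD board (i + 10 * r) "" == "#")) with
    | some r => 20 - r
    | none => 0)

-- ===== PRECONDITION & SPEC =====
def Spec_get_col_heights (board : List String) (out : List Int) : Prop := out = get_col_heights_alt board
instance (board : List String) (out : List Int) : Decidable (Spec_get_col_heights board out) := by unfold Spec_get_col_heights; infer_instance

-- ===== CLAIM (what is proved, stated in full; the proofs are below) =====
def Claim_equal_get_col_heights : Prop := ∀ (board : List String), Dom_get_col_heights board → Spec_get_col_heights board (get_col_heights board)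

-- ===== LEMMAS AND PROOFS =====

-- the row slice for a given count, and "column j of that row is filled"
def rowAt (board : List String) (c : Int) : List String :=
  PySem.List.slice board (some (c * 10)) (some ((c + 1) * 10))

def colHit (board : List String) (j : Nat) (c : Int) : Bool :=
  decide (j < (rowAt board c).length ∧ (rowAt board c).getD j "" = "#")

-- A's outer-loop body
def stepA (board : List String) (ch : List Int) (count : Int) : List Int :=
  (PySem.List.enumerate (rowAt board count)).foldl
    (fun ch p =>
      if p.2 == "#" && PySem.List.pyGetD ch p.1 0 == 0 then
        PySem.List.pySetD ch p.1 (20 - count)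
      else ch)
    ch

theorem get_col_heights_eq_fold (board : List String) :
    get_col_heights board
      = (PySem.List.pyRange 0 20 1).foldl (stepA board) (List.replicate 10 0) := rfl

-- getD after set, as a conditional
theorem getD_set_ite (ch : List Int) (s j : Nat) (v : Int) (hs : s < ch.length) :
    (ch.set s v).getD j 0 = if j = s then v else ch.getD j 0 := by
  by_cases hj : j = s
  · subst hj; simp [List.getD, List.getElem?_set_self hs]
  · simp [List.getD, List.getElem?_set_ne (fun h => hj h.symm), hj]

-- getD of a cons at an offset index
theorem getD_cons_sub (x : String) (row : List String) (s j : Nat) (hsj : s ≤ j) :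
    (x :: row).getD (j - s) "" = if j = s then x else row.getD (j - (s + 1)) "" := by
  by_cases h : j = s
  · subst h; simp
  · have hd : j - s = (j - (s + 1)) + 1 := by omega
    rw [hd]; simp [h]

-- inner loop of A, elementwise (induction on the row, generalizing the start index)
theorem innerA_getD (v : Int) (row : List String) :
    ∀ (s : Nat) (ch : List Int), s + row.length ≤ ch.length → ∀ j : Nat,
      ((PySem.List.enumerate row (s : Int)).foldl
        (fun ch p =>
          if p.2 == "#" && PySem.List.pyGetD ch p.1 0 == 0 then
            PySem.List.pySetD ch p.1 v
          else ch) ch).getD j 0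
      = if s ≤ j ∧ j < s + row.length ∧ row.getD (j - s) "" = "#" ∧ ch.getD j 0 = 0
        then v else ch.getD j 0 := by
  induction row with
  | nil =>
    intro s ch _ j
    simp only [PySem.List.enumerate, List.foldl_nil]
    rw [if_neg (by rintro ⟨h1, h2, -⟩; simp at h2; omega)]
  | cons x row ih =>
    intro s ch hlen j
    rw [PySem.List.enumerate_cons]
    simp only [List.foldl_cons]
    have hcast : ((s : Int) + 1) = ((s + 1 : Nat) : Int) := by push_cast; ring
    have hs : s < ch.length := by simp at hlen; omega
    have hlen' : (s + 1) + row.length ≤ ch.length := by simp at hlen; omega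
    by_cases hx : (x == "#" && PySem.List.pyGetD ch (s : Int) 0 == 0) = true
    · -- guard true at index s: x = "#" and ch.getD s 0 = 0
      have hx' : x = "#" ∧ ch.getD s 0 = 0 := by
        rw [Bool.and_eq_true] at hx
        exact ⟨by simpa using hx.1, by simpa [PySem.List.pyGetD_natCast] using hx.2⟩
      rw [if_pos hx, hcast,
        ih (s + 1) (PySem.List.pySetD ch (s : Int) v)
          (by simpa [PySem.List.pySetD_natCast] using hlen')]
      simp only [PySem.List.pySetD_natCast, getD_set_ite ch s _ v hs]
      by_cases hA : (s + 1 ≤ j ∧ j < s + 1 + row.length ∧ row.getD (j - (s + 1)) "" = "#" ∧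
          (if j = s then v else ch.getD j 0) = 0)
      · by_cases hB : (s ≤ j ∧ j < s + (x :: row).length ∧ (x :: row).getD (j - s) "" = "#" ∧
            ch.getD j 0 = 0)
        · rw [if_pos hA, if_pos hB]
        · exfalso; apply hB
          have hj : j ≠ s := by omega
          have hifne := hA.2.2.2
          rw [if_neg hj] at hifne
          refine ⟨by omega, by simp only [List.length_cons]; omega, ?_, hifne⟩
          rw [getD_cons_sub x row s j (by omega), if_neg hj]
          exact hA.2.2.1
      · by_cases hB : (s ≤ j ∧ j < s + (x :: row).length ∧ (x :: row).getD (j - s) "" = "#" ∧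
            ch.getD j 0 = 0)
        · rw [if_neg hA, if_pos hB]
          by_cases hj : j = s
          · rw [if_pos hj]
          · exfalso; apply hA
            have h3 := hB.2.2.1
            rw [getD_cons_sub x row s j hB.1, if_neg hj] at h3
            have h2 := hB.2.1
            simp only [List.length_cons] at h2
            refine ⟨by omega, by omega, h3, ?_⟩
            rw [if_neg hj]
            exact hB.2.2.2
        · rw [if_neg hA, if_neg hB]
          by_cases hj : j = s
          · exfalso; apply hB
            refine ⟨by omega, by simp only [List.length_cons]; omega, ?_, ?_⟩
            · rw [getD_cons_sub x row s j (by omega), if_pos hj]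
              exact hx'.1
            · rw [hj]
              exact hx'.2
          · rw [if_neg hj]
    · -- guard false at index s
      have hx' : ¬ (x = "#" ∧ ch.getD s 0 = 0) := by
        rintro ⟨h1, h2⟩
        apply hx
        have h2' : ch[s]?.getD 0 = 0 := by simpa [List.getD] using h2
        simp [h1, PySem.List.pyGetD_natCast, List.getD, h2']
      rw [if_neg hx, hcast, ih (s + 1) ch hlen']
      by_cases hA : (s + 1 ≤ j ∧ j < s + 1 + row.length ∧ row.getD (j - (s + 1)) "" = "#" ∧
          ch.getD j 0 = 0)
      · by_cases hB : (s ≤ j ∧ j < s + (x :: row).length ∧ (x :: row).getD (j - s) "" = "#" ∧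
            ch.getD j 0 = 0)
        · rw [if_pos hA, if_pos hB]
        · exfalso; apply hB
          have hj : j ≠ s := by omega
          refine ⟨by omega, by simp only [List.length_cons]; omega, ?_, hA.2.2.2⟩
          rw [getD_cons_sub x row s j (by omega), if_neg hj]
          exact hA.2.2.1
      · by_cases hB : (s ≤ j ∧ j < s + (x :: row).length ∧ (x :: row).getD (j - s) "" = "#" ∧
            ch.getD j 0 = 0)
        · by_cases hj : j = s
          · exfalso; apply hx'
            have h3 := hB.2.2.1
            rw [getD_cons_sub x row s j hB.1, if_pos hj] at h3
            exact ⟨h3, hj ▸ hB.2.2.2⟩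
          · exfalso; apply hA
            have h3 := hB.2.2.1
            rw [getD_cons_sub x row s j hB.1, if_neg hj] at h3
            have h2 := hB.2.1
            simp only [List.length_cons] at h2
            exact ⟨by omega, by omega, h3, hB.2.2.2⟩
        · rw [if_neg hA, if_neg hB]

-- the row slices are short enough to fit in the 10-cell accumulator
theorem rowAt_length_le (board : List String) (c : Int) (hc : 0 ≤ c) :
    (rowAt board c).length ≤ 10 := by
  unfold rowAt
  rw [PySem.List.length_slice]
  have h1 := PySem.List.clampIdx_natCast board.length (c.toNat * 10)
  have h2 := PySem.List.clampIdx_natCast board.length (c.toNat * 10 + 10)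
  have e1 : ((c.toNat * 10 : Nat) : Int) = c * 10 := by push_cast; rw [Int.toNat_of_nonneg hc]
  have e2 : ((c.toNat * 10 + 10 : Nat) : Int) = (c + 1) * 10 := by
    push_cast; rw [Int.toNat_of_nonneg hc]; ring
  rw [e1] at h1; rw [e2] at h2
  rw [h1, h2]
  omega

theorem length_stepA (board : List String) (ch : List Int) (c : Int) :
    (stepA board ch c).length = ch.length := by
  unfold stepA
  generalize PySem.List.enumerate (rowAt board c) = l
  induction l generalizing ch with
  | nil => rfl
  | cons p l ih =>
    simp only [List.foldl_cons]
    split_ifs <;> rw [ih] <;> simp [PySem.List.length_pySetD]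

-- stepA elementwise
theorem stepA_getD (board : List String) (ch : List Int) (c : Int)
    (hc : 0 ≤ c) (hch : ch.length = 10) (j : Nat) :
    (stepA board ch c).getD j 0
      = if colHit board j c ∧ ch.getD j 0 = 0 then 20 - c else ch.getD j 0 := by
  unfold stepA
  have hle : 0 + (rowAt board c).length ≤ ch.length := by
    have := rowAt_length_le board c hc; omega
  have h := innerA_getD (20 - c) (rowAt board c) 0 ch hle j
  simp only [Nat.cast_zero] at h
  rw [h]
  simp [colHit, and_assoc]

-- A's fold: first hit wins (the guard blocks later writes)
theorem foldA_getD (board : List String) (cs : List Int) :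
    ∀ ch : List Int, ch.length = 10 → (∀ c ∈ cs, 0 ≤ c ∧ c < 20) → ∀ j : Nat,
      (cs.foldl (stepA board) ch).getD j 0
        = if ch.getD j 0 = 0 then
            (match cs.find? (colHit board j) with
             | some c => 20 - c
             | none => 0)
          else ch.getD j 0 := by
  induction cs with
  | nil => intro ch _ _ j; simp
  | cons c cs ih =>
    intro ch hch hcs j
    simp only [List.foldl_cons]
    obtain ⟨hc0, hc20⟩ := hcs c (by simp)
    have hlen : (stepA board ch c).length = 10 := by rw [length_stepA, hch]
    rw [ih (stepA board ch c) hlen (fun c' hc' => hcs c' (by simp [hc']))]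
    rw [stepA_getD board ch c hc0 hch j]
    by_cases h0 : ch.getD j 0 = 0
    · by_cases hh : colHit board j c = true
      · have hinner : (if colHit board j c = true ∧ ch.getD j 0 = 0 then (20 : Int) - c
            else ch.getD j 0) = 20 - c := if_pos ⟨hh, h0⟩
        rw [hinner, if_neg (show ¬ ((20 : Int) - c = 0) by omega),
          if_pos h0, List.find?_cons_of_pos hh]
      · have hh' : ¬ (colHit board j c = true ∧ ch.getD j 0 = 0) := fun hcontr => hh hcontr.1
        have hinner : (if colHit board j c = true ∧ ch.getD j 0 = 0 then (20 : Int) - c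
            else ch.getD j 0) = ch.getD j 0 := if_neg hh'
        rw [hinner, if_pos h0, List.find?_cons_of_neg hh, if_pos h0]
    · have hh' : ¬ (colHit board j c = true ∧ ch.getD j 0 = 0) := fun hcontr => h0 hcontr.2
      have hinner : (if colHit board j c = true ∧ ch.getD j 0 = 0 then (20 : Int) - c
          else ch.getD j 0) = ch.getD j 0 := if_neg hh'
      rw [hinner, if_neg h0, if_neg h0]

theorem foldA_length (board : List String) (cs : List Int) :
    ∀ ch : List Int, (cs.foldl (stepA board) ch).length = ch.length := by
  induction cs with
  | nil => intro ch; rfl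
  | cons c cs ih => intro ch; simp only [List.foldl_cons]; rw [ih, length_stepA]

-- colHit, expressed on the flat board as B's per-column predicate computes it
theorem colHit_eq (board : List String) (j m : Nat) (hj : j < 10) :
    colHit board j (m : Int)
      = (decide ((j : Int) + 10 * (m : Int) < (board.length : Int))
          && (PySem.List.pyGetD board ((j : Int) + 10 * (m : Int)) "" == "#")) := by
  have hrow : rowAt board (m : Int) = (board.drop (m * 10)).take 10 := by
    unfold rowAt
    have e1 : ((m : Int) * 10) = ((m * 10 : Nat) : Int) := by push_cast; ring
    have e2 : (((m : Int) + 1) * 10) = ((m * 10 + 10 : Nat) : Int) := by push_cast; ring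
    rw [e1, e2, PySem.List.slice_natCast]
    congr 1
    omega
  have hidx : ((j : Int) + 10 * (m : Int)) = ((m * 10 + j : Nat) : Int) := by push_cast; ring
  rw [hidx, PySem.List.pyGetD_natCast]
  unfold colHit
  rw [hrow]
  have hlen : ((board.drop (m * 10)).take 10).length = min 10 (board.length - m * 10) := by
    simp
  by_cases hin : m * 10 + j < board.length
  · have hjlen : j < ((board.drop (m * 10)).take 10).length := by rw [hlen]; omega
    have hget : ((board.drop (m * 10)).take 10).getD j "" = board.getD (m * 10 + j) "" := by
      simp [List.getD, List.getElem?_drop, hj]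
    rw [hget]
    have hgel : board.getD (m * 10 + j) "" = board[m * 10 + j]'hin :=
      List.getD_eq_getElem board "" hin
    by_cases hsh : board.getD (m * 10 + j) "" = "#"
    · rw [decide_eq_true (⟨hjlen, hsh⟩ : _ ∧ _)]
      rw [hgel] at hsh
      have hlt : ((m : Int)) * 10 + (j : Int) < (board.length : Int) := by omega
      simp [hlt, List.getElem?_eq_getElem hin, hsh]
    · have hne : ¬ (j < ((board.drop (m * 10)).take 10).length ∧
          board.getD (m * 10 + j) "" = "#") := fun h => hsh h.2
      rw [decide_eq_false hne]
      have hq : (board.getD (m * 10 + j) "" == "#") = false := by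
        simpa [beq_eq_false_iff_ne] using hsh
      simp only [List.getD] at hq
      simp [hq]
  · have hjlen : ¬ j < ((board.drop (m * 10)).take 10).length := by rw [hlen]; omega
    have hne : ¬ (j < ((board.drop (m * 10)).take 10).length ∧
        ((board.drop (m * 10)).take 10).getD j "" = "#") := fun h => hjlen h.1
    rw [decide_eq_false hne]
    symm
    simp only [Bool.eq_false_iff, ne_eq, Bool.and_eq_true, decide_eq_true_eq, beq_iff_eq, not_and]
    intro h
    exfalso
    omega

-- find? only looks at the predicate on the list's members
theorem find?_congr_mem {α : Type} (l : List α) (p q : α → Bool)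
    (h : ∀ x ∈ l, p x = q x) : l.find? p = l.find? q := by
  induction l with
  | nil => rfl
  | cons x l ih =>
    have hx := h x (by simp)
    by_cases hp : p x = true
    · rw [List.find?_cons_of_pos hp, List.find?_cons_of_pos (hx ▸ hp)]
    · rw [List.find?_cons_of_neg hp, List.find?_cons_of_neg (by rw [← hx]; exact hp),
        ih (fun y hy => h y (by simp [hy]))]

-- ===== VERDICT (by name: the statement is the Claim_ definition above) =====
theorem get_col_heights_spec : Claim_equal_get_col_heights := by
  intro board _
  unfold Spec_get_col_heights get_col_heights_alt
  rw [get_col_heights_eq_fold]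
  have hA := foldA_getD board (PySem.List.pyRange 0 20 1) (List.replicate 10 0) (by simp)
    (by decide)
  have hlenA : ((PySem.List.pyRange 0 20 1).foldl (stepA board) (List.replicate 10 0)).length = 10 := by
    rw [foldA_length]; simp
  have hlenB : ((PySem.List.pyRange 0 10 1).map (fun i =>
      match (PySem.List.pyRange 0 20 1).find?
          (fun r => decide (i + 10 * r < (board.length : Int))
            && (PySem.List.pyGetD board (i + 10 * r) "" == "#")) with
      | some r => 20 - r
      | none => 0)).length = 10 := by
    simp [PySem.List.length_pyRange_one]
  apply List.ext_getElem (by rw [hlenA]; rw [hlenB])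
  intro j hj1 hj2
  have hj10 : j < 10 := by rw [hlenA] at hj1; exact hj1
  -- A's element j
  have hgdA : ((PySem.List.pyRange 0 20 1).foldl (stepA board) (List.replicate 10 0))[j]
      = ((PySem.List.pyRange 0 20 1).foldl (stepA board) (List.replicate 10 0)).getD j 0 := by
    rw [List.getD_eq_getElem _ 0 hj1]
  have hrep : (List.replicate 10 (0 : Int)).getD j 0 = 0 := by
    rw [List.getD_eq_getElem _ _ (by simpa using hj10)]
    interval_cases j <;> rfl
  -- B's element j
  rw [hgdA, hA j, if_pos hrep, List.getElem_map]
  have hidx : (PySem.List.pyRange 0 10 1)[j]'(by simpa [PySem.List.length_pyRange_one] using hj10)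
      = (j : Int) := by
    rw [PySem.List.getElem_pyRange_one]
    omega
  rw [hidx]
  have hfind : (PySem.List.pyRange 0 20 1).find? (colHit board j)
      = (PySem.List.pyRange 0 20 1).find?
          (fun r => decide ((j : Int) + 10 * r < (board.length : Int))
            && (PySem.List.pyGetD board ((j : Int) + 10 * r) "" == "#")) := by
    apply find?_congr_mem
    intro c hc
    have hc' : 0 ≤ c ∧ c < 20 := by
      rw [PySem.List.mem_pyRange_one] at hc
      exact hc
    have hcm : c = ((c.toNat : Nat) : Int) := by omega
    rw [hcm]
    exact colHit_eq board j c.toNat hj10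
  rw [← hfind]
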